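-- pv_equiv track=rewrite | github.com/tarlansoltanov/CodeWars | 5 KYU/Decimal to Factorial and Back/Solution.py | dec_2_fact_string
-- ===== SOURCE A (Python) =====
-- def dec_2_fact_string(nb):
--     arr = "0123456789ABCDEFGHIJKLMNOPQRSTUVWXYZ"
--     ans  = ""
--     n = 1
--     while nb != 0:
--         ans = arr[nb % n] + ans
--         nb //= n
--         n += 1
--     return ans
-- ===== SOURCE B (Python) =====
-- def dec_2_fact_string(nb):
--     arr = "0123456789ABCDEFGHIJKLMNOPQRSTUVWXYZ"
--     if nb == 0:
--         return ""
--     # grow the highest factorial place: k maximal with k! <= nb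
--     k, fact = 1, 1
--     while fact * (k + 1) <= nb:
--         k += 1
--         fact *= k
--     # emit digits from the highest place down
--     ans = ""
--     while k >= 1:
--         ans += arr[nb // fact]
--         nb %= fact
--         fact //= k
--         k -= 1
--     return ans + "0"
-- ===== Notes on version B (the rewrite author's own statement) =====
-- stated objective: alternative
-- what changed: B first grows the largest factorial place value k! <= nb, then emits digits most-significant-first by dividing nb down through the factorial weights, instead of A's ascending-radix loop that prepends digits from the least significant end.
import Mathlib
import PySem

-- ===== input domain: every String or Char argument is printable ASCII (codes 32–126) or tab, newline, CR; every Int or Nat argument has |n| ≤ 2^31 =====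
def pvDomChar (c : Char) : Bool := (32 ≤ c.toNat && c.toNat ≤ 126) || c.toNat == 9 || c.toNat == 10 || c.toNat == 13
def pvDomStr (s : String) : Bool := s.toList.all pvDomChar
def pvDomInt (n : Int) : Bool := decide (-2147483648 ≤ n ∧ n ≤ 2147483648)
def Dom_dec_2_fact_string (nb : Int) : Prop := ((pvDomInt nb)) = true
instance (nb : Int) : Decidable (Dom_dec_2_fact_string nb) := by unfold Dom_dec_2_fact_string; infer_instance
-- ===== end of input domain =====

-- B replaces A's ascending-radix digit loop (least-significant first, prepending) by first growing the
-- largest factorial place value k! ≤ nb and then emitting digits most-significant first, dividing down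
-- through the factorial weights (objective: alternative decomposition, same cost).

-- ===== PORT A =====
def pvArr : String := "0123456789ABCDEFGHIJKLMNOPQRSTUVWXYZ"

-- while nb != 0: ans = arr[nb % n] + ans; nb //= n; n += 1   (fuel-bounded; the loop does not
-- terminate for nb < 0 in Python, which Pre_ excludes)
def pvLoopA : Nat → Int → Int → List Char → List Char
  | 0, _, _, ans => ans
  | fuel + 1, nb, n, ans =>
    if nb ≠ 0 then
      match PySem.Str.pyGet? pvArr (PySem.Int.mod nb n) with
      | some c => pvLoopA fuel (PySem.Int.floordiv nb n) (n + 1) (c :: ans)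
      | none => ans   -- IndexError in Python: outside Pre_ ∩ Dom, never reached
    else ans

def dec_2_fact_string (nb : Int) : String :=
  String.ofList (pvLoopA (nb.natAbs + 2) nb 1 [])

-- ===== PORT B =====
-- while fact * (k + 1) <= nb: k += 1; fact *= k   (fuel-bounded; fact strictly grows)
def pvGrow : Nat → Int → Int → Int → Int × Int
  | 0, k, fact, _ => (k, fact)
  | fuel + 1, k, fact, nb =>
    if fact * (k + 1) ≤ nb then pvGrow fuel (k + 1) (fact * (k + 1)) nb
    else (k, fact)

-- while k >= 1: ans += arr[nb // fact]; nb %= fact; fact //= k; k -= 1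
def pvEmit (nb k fact : Int) (ans : List Char) : List Char :=
  if h : 1 ≤ k then
    match PySem.Str.pyGet? pvArr (PySem.Int.floordiv nb fact) with
    | some c => pvEmit (PySem.Int.mod nb fact) (k - 1) (PySem.Int.floordiv fact k) (ans ++ [c])
    | none => ans   -- IndexError in Python: outside Pre_ ∩ Dom, never reached
  else ans
termination_by k.toNat
decreasing_by omega

def dec_2_fact_string_alt (nb : Int) : String :=
  if nb = 0 then ""
  else
    let kf := pvGrow (nb.natAbs + 1) 1 1 nb
    String.ofList (pvEmit nb kf.1 kf.2 [] ++ ['0'])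

-- ===== PRECONDITION & SPEC =====
-- Pre_ excludes negative nb, on which A's while loop never terminates (floor division keeps nb negative forever).
def Pre_dec_2_fact_string (nb : Int) : Prop := 0 ≤ nb
instance (nb : Int) : Decidable (Pre_dec_2_fact_string nb) := by
  unfold Pre_dec_2_fact_string; infer_instance

def pvWitness_dec_2_fact_string : Int := (5)

def Spec_dec_2_fact_string (nb : Int) (out : String) : Prop := out = dec_2_fact_string_alt nb
instance (nb : Int) (out : String) : Decidable (Spec_dec_2_fact_string nb out) := by
  unfold Spec_dec_2_fact_string; infer_instance

-- ===== CLAIM (what is proved, stated in full; the proofs are below) =====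
def Claim_equal_dec_2_fact_string : Prop :=
  ∀ (nb : Int), Dom_dec_2_fact_string nb → Pre_dec_2_fact_string nb →
    Spec_dec_2_fact_string nb (dec_2_fact_string nb)

-- ===== LEMMAS AND PROOFS =====

-- the digit characters, on the list side
def pvArrL : List Char := pvArr.toList

def charOf (d : Nat) : Char := pvArrL.getD d ' '

lemma pvArr_get (d : Nat) (hd : d < 36) :
    PySem.Str.pyGet? pvArr (d : Int) = some (charOf d) := by
  interval_cases d <;> rfl

-- k factorial-base digits of nb, least significant first, moduli n, n+1, …, n+k-1 (fixed length k)
def repF : Nat → Nat → Nat → List Nat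
  | _, _, 0 => []
  | nb, n, k + 1 => (nb % n) :: repF (nb / n) (n + 1) k

-- product n * (n+1) * … * (n+k-1): total weight of the first k places
def Pfac : Nat → Nat → Nat
  | _, 0 => 1
  | n, k + 1 => n * Pfac (n + 1) k

lemma Pfac_pos (n k : Nat) (hn : 0 < n) : 0 < Pfac n k := by
  induction k generalizing n with
  | zero => simp [Pfac]
  | succ k ih => simpa [Pfac] using Nat.mul_pos hn (ih (n+1) (by omega))

lemma Pfac_succ_right (n k : Nat) : Pfac n (k + 1) = Pfac n k * (n + k) := by
  induction k generalizing n with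
  | zero => simp [Pfac]
  | succ k ih =>
    calc Pfac n (k + 2) = n * Pfac (n+1) (k+1) := rfl
    _ = n * (Pfac (n+1) k * (n + 1 + k)) := by rw [ih]
    _ = Pfac n (k+1) * (n + (k+1)) := by simp [Pfac]; ring

lemma Pfac_two (k : Nat) : Pfac 2 k = Nat.factorial (k + 1) := by
  induction k with
  | zero => rfl
  | succ k ih =>
    rw [Pfac_succ_right, ih]
    show (k+1).factorial * (2+k) = ((k+1)+1).factorial
    rw [Nat.factorial_succ ((k+1))]
    ring

-- the last (most significant) digit of repF, split off
lemma repF_last (k : Nat) : ∀ n nb : Nat, 0 < n →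
    repF nb n (k + 1) = repF (nb % Pfac n k) n k ++ [nb / Pfac n k % (n + k)] := by
  induction k with
  | zero => intro n nb hn; simp [repF, Pfac]
  | succ k ih =>
    intro n nb hn
    have hP' : 0 < Pfac (n+1) k := Pfac_pos _ _ (by omega)
    have h1 : nb % (n * Pfac (n+1) k) % n = nb % n := Nat.mod_mod_of_dvd nb (Dvd.intro _ rfl)
    have h2 : nb % (n * Pfac (n+1) k) / n = nb / n % Pfac (n+1) k := Nat.mod_mul_right_div_self nb n _
    have h3 : nb / (n * Pfac (n+1) k) = nb / n / Pfac (n+1) k := (Nat.div_div_eq_div_mul nb n _).symm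
    have hnk : n + 1 + k = n + (k+1) := by omega
    rw [show Pfac n (k+1) = n * Pfac (n+1) k from rfl]
    rw [show repF (nb % (n * Pfac (n+1) k)) n (k+1) = (nb % (n * Pfac (n+1) k) % n) :: repF (nb % (n * Pfac (n+1) k) / n) (n+1) k from rfl]
    rw [h1, h2, h3, List.cons_append]
    rw [show repF nb n (k+2) = (nb % n) :: repF (nb/n) (n+1) (k+1) from rfl]
    rw [ih (n+1) (nb/n) (by omega), hnk]

lemma pvLoopA_zero (fuel : Nat) (n : Int) (ans : List Char) :
    pvLoopA fuel 0 n ans = ans := by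
  cases fuel <;> simp [pvLoopA]

-- A's loop from modulus n produces the reversed digit list
lemma pvLoopA_spec (k : Nat) : ∀ (n nb fuel : Nat) (ans : List Char),
    2 ≤ n → n + k ≤ 36 → Pfac n k ≤ nb → nb < Pfac n (k + 1) → k + 1 ≤ fuel →
    pvLoopA fuel (nb : Int) (n : Int) ans
      = (List.map charOf (repF nb n (k + 1))).reverse ++ ans := by
  induction k with
  | zero =>
    intro n nb fuel ans hn h36 hlo hhi hfuel
    simp only [Pfac, Nat.mul_one] at hlo hhi
    obtain ⟨f, rfl⟩ : ∃ f, fuel = f + 1 := ⟨fuel - 1, by omega⟩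
    have hne : (nb : Int) ≠ 0 := by exact_mod_cast (by omega : nb ≠ 0)
    have hd : nb % n < 36 := by have := Nat.mod_lt nb (y := n) (by omega); omega
    show (if (nb : Int) ≠ 0 then _ else _) = _
    rw [if_pos hne, PySem.Int.mod_natCast, PySem.Int.floordiv_natCast, pvArr_get _ hd]
    show pvLoopA f ((nb / n : Nat) : Int) _ _ = _
    rw [Nat.div_eq_of_lt hhi]
    rw [show ((0:Nat):Int) = 0 from rfl, pvLoopA_zero]
    simp [repF, Nat.mod_eq_of_lt hhi]
  | succ k ih =>
    intro n nb fuel ans hn h36 hlo hhi hfuel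
    have hP' : 0 < Pfac (n+1) k := Pfac_pos _ _ (by omega)
    have hP'' : 0 < Pfac (n+1) (k+1) := Pfac_pos _ _ (by omega)
    have hlo' : n * Pfac (n+1) k ≤ nb := by simpa [Pfac] using hlo
    have hhi' : nb < n * Pfac (n+1) (k+1) := by simpa [Pfac] using hhi
    have hnb : 0 < nb := lt_of_lt_of_le (Nat.mul_pos (by omega) hP') hlo'
    obtain ⟨f, rfl⟩ : ∃ f, fuel = f + 1 := ⟨fuel - 1, by omega⟩
    have hne : (nb : Int) ≠ 0 := by exact_mod_cast (by omega : nb ≠ 0)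
    have hd : nb % n < 36 := by have := Nat.mod_lt nb (y := n) (by omega); omega
    show (if (nb : Int) ≠ 0 then _ else _) = _
    rw [if_pos hne, PySem.Int.mod_natCast, PySem.Int.floordiv_natCast, pvArr_get _ hd]
    show pvLoopA f ((nb / n : Nat) : Int) ((n : Int) + 1) _ = _
    rw [show ((n : Int) + 1) = ((n + 1 : Nat) : Int) by push_cast; ring]
    have hA : Pfac (n+1) k ≤ nb / n :=
      (Nat.le_div_iff_mul_le (by omega)).mpr (by rw [Nat.mul_comm]; exact hlo')
    have hB : nb / n < Pfac (n+1) (k+1) :=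
      (Nat.div_lt_iff_lt_mul (by omega)).mpr (by rw [Nat.mul_comm]; exact hhi')
    rw [ih (n+1) (nb/n) f (charOf (nb % n) :: ans) (by omega) (by omega) hA hB (by omega)]
    rw [show repF nb n (k+2) = (nb % n) :: repF (nb/n) (n+1) (k+1) from rfl]
    simp

-- B's grow loop reaches exactly (K, K!) for the maximal K with K! ≤ nb
lemma pvGrow_spec (fuel : Nat) : ∀ (k K nb : Nat), k ≤ K → Nat.factorial K ≤ nb →
    nb < Nat.factorial (K + 1) → K < k + fuel →
    pvGrow fuel (k : Int) ((Nat.factorial k : Nat) : Int) (nb : Int)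
      = ((K : Int), ((Nat.factorial K : Nat) : Int)) := by
  induction fuel with
  | zero => intro k K nb h1 _ _ h4; omega
  | succ fuel ih =>
    intro k K nb h1 h2 h3 h4
    show (if ((Nat.factorial k : Nat) : Int) * ((k : Int) + 1) ≤ (nb : Int) then _ else _) = _
    rcases Nat.eq_or_lt_of_le h1 with rfl | hlt
    · rw [if_neg]
      rw [show ((Nat.factorial k : Nat) : Int) * ((k : Int) + 1) = ((Nat.factorial (k+1) : Nat) : Int) by
        rw [Nat.factorial_succ]; push_cast; ring]
      exact_mod_cast Nat.not_le.mpr h3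
    · rw [if_pos]
      · rw [show ((Nat.factorial k : Nat) : Int) * ((k : Int) + 1) = ((Nat.factorial (k+1) : Nat) : Int) by
          rw [Nat.factorial_succ]; push_cast; ring]
        rw [show ((k : Int) + 1) = ((k + 1 : Nat) : Int) by push_cast; ring]
        exact ih (k+1) K nb (by omega) h2 h3 (by omega)
      · rw [show ((Nat.factorial k : Nat) : Int) * ((k : Int) + 1) = ((Nat.factorial (k+1) : Nat) : Int) by
          rw [Nat.factorial_succ]; push_cast; ring]
        exact_mod_cast le_trans (Nat.factorial_le (by omega : k + 1 ≤ K)) h2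

-- B's emit loop produces the same reversed digit list
lemma pvEmit_spec (K : Nat) : ∀ (nb : Nat) (ans : List Char), nb < Nat.factorial (K + 1) → K ≤ 34 →
    pvEmit (nb : Int) (K : Int) ((Nat.factorial K : Nat) : Int) ans
      = ans ++ (List.map charOf (repF nb 2 K)).reverse := by
  induction K with
  | zero =>
    intro nb ans _ _
    rw [pvEmit]
    simp [repF]
  | succ K ih =>
    intro nb ans hnb h34
    have hfpos : 0 < Nat.factorial (K + 1) := Nat.factorial_pos _
    have hdig : nb / Nat.factorial (K + 1) < K + 2 :=
      (Nat.div_lt_iff_lt_mul hfpos).mpr (by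
        calc nb < Nat.factorial (K + 2) := hnb
        _ = (K + 2) * Nat.factorial (K + 1) := Nat.factorial_succ _)
    rw [pvEmit]
    rw [dif_pos (by exact_mod_cast Nat.succ_le_succ (Nat.zero_le K) : (1:Int) ≤ ((K+1 : Nat) : Int))]
    simp only [PySem.Int.floordiv_natCast, PySem.Int.mod_natCast]
    rw [pvArr_get _ (by omega)]
    show pvEmit _ (((K + 1 : Nat) : Int) - 1) (((Nat.factorial (K+1) / (K+1) : Nat) : Int)) _ = _
    rw [show (((K + 1 : Nat) : Int) - 1) = ((K : Nat) : Int) by push_cast; ring]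
    rw [show Nat.factorial (K + 1) / (K + 1) = Nat.factorial K by
      rw [Nat.factorial_succ]; exact Nat.mul_div_cancel_left _ (by omega)]
    rw [ih (nb % Nat.factorial (K + 1)) _ (lt_of_lt_of_le (Nat.mod_lt _ hfpos) (Nat.factorial_le (by omega))) (by omega)]
    rw [show repF nb 2 (K + 1) = repF (nb % Pfac 2 K) 2 K ++ [nb / Pfac 2 K % (2 + K)] from repF_last K 2 nb (by omega)]
    rw [Pfac_two K]
    rw [Nat.mod_eq_of_lt (by omega : nb / Nat.factorial (K + 1) < 2 + K)]
    simp

-- the maximal factorial place for 1 ≤ nb ≤ 2^31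
lemma exists_K (nb : Nat) (h1 : 1 ≤ nb) (h2 : nb ≤ 2147483648) :
    ∃ K, 1 ≤ K ∧ K ≤ 12 ∧ Nat.factorial K ≤ nb ∧ nb < Nat.factorial (K + 1) := by
  have h1' : (fun k => Nat.factorial k ≤ nb) 1 := by simpa [Nat.factorial] using h1
  refine ⟨Nat.findGreatest (fun k => Nat.factorial k ≤ nb) 12, ?_, Nat.findGreatest_le _, ?_, ?_⟩
  · exact Nat.le_findGreatest (by omega) h1'
  · exact Nat.findGreatest_spec (P := fun k => Nat.factorial k ≤ nb) (m := 1) (by omega) h1'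
  · set K := Nat.findGreatest (fun k => Nat.factorial k ≤ nb) 12 with hK
    rcases Nat.lt_or_ge K 12 with h | h
    · have := Nat.findGreatest_is_greatest (show K < K + 1 by omega) (by omega)
      simp only at this
      omega
    · have h12 : K = 12 := le_antisymm (Nat.findGreatest_le _) h
      have hf : Nat.factorial (12 + 1) = 6227020800 := by norm_num [Nat.factorial]
      rw [h12, hf]
      omega

-- ===== VERDICT (by name: the statement is the Claim_ definition above) =====
theorem dec_2_fact_string_spec : Claim_equal_dec_2_fact_string := by
  intro nb hdom hpre
  unfold Spec_dec_2_fact_string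
  obtain ⟨m, rfl⟩ : ∃ m : Nat, nb = (m : Int) := ⟨nb.toNat, (Int.toNat_of_nonneg hpre).symm⟩
  have hm31 : m ≤ 2147483648 := by
    unfold Dom_dec_2_fact_string pvDomInt at hdom
    rw [decide_eq_true_iff] at hdom
    omega
  rcases Nat.eq_zero_or_pos m with rfl | hm
  · rfl
  · obtain ⟨K, hK1, hK12, hKle, hKlt⟩ := exists_K m hm hm31
    have hKm : K ≤ m := le_trans (Nat.self_le_factorial K) hKle
    -- A side
    have hne : ((m : Int)) ≠ 0 := by exact_mod_cast (by omega : m ≠ 0)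
    obtain ⟨K', rfl⟩ : ∃ K', K = K' + 1 := ⟨K - 1, by omega⟩
    have hA : dec_2_fact_string (m : Int)
        = String.ofList ((List.map charOf (repF m 2 (K' + 1))).reverse ++ ['0']) := by
      unfold dec_2_fact_string
      rw [Int.natAbs_natCast]
      show String.ofList (if ((m:Int)) ≠ 0 then _ else _) = _
      rw [if_pos hne]
      rw [show (1 : Int) = ((1 : Nat) : Int) from rfl, PySem.Int.mod_natCast, PySem.Int.floordiv_natCast]
      rw [pvArr_get _ (by omega)]
      rw [show m % 1 = 0 from Nat.mod_one m, show m / 1 = m from Nat.div_one m]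
      show String.ofList (pvLoopA (m + 1) ((m : Nat) : Int) (((1:Nat) : Int) + 1) [charOf 0]) = _
      rw [(by norm_num : ((1:Nat) : Int) + 1 = ((2 : Nat) : Int))]
      rw [pvLoopA_spec K' 2 m (m + 1) [charOf 0] (by omega) (by omega)
        (by rw [Pfac_two K']; exact hKle) (by rw [Pfac_two (K'+1)]; exact hKlt) (by omega)]
      rfl
    -- B side
    have hB : dec_2_fact_string_alt (m : Int)
        = String.ofList ((List.map charOf (repF m 2 (K' + 1))).reverse ++ ['0']) := by
      unfold dec_2_fact_string_alt
      rw [if_neg hne, Int.natAbs_natCast]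
      have hg := pvGrow_spec (m + 1) 1 (K' + 1) m (by omega) hKle hKlt (by omega)
      rw [show ((1 : Nat) : Int) = (1 : Int) from rfl,
        show ((Nat.factorial 1 : Nat) : Int) = (1 : Int) from rfl] at hg
      rw [hg]
      show String.ofList (pvEmit ((m : Nat) : Int) (((K' + 1 : Nat)) : Int)
        ((Nat.factorial (K' + 1) : Nat) : Int) [] ++ ['0']) = _
      rw [pvEmit_spec (K' + 1) m [] hKlt (by omega)]
      simp
    rw [hA, hB]
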